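-- pv_equiv track=rewrite | github.com/ProfDiesel/jkfmdqsdfs | rag2/prompt.py | litm
-- ===== SOURCE A (Python) =====
-- from typing import TypeVar, Type, Callable, Awaitable, Mapping, Final
--
-- T = TypeVar('T')
--
-- def litm(documents: list[T]) -> list[T]:
--     """https://arxiv.org/abs//2307.03172"""
--
--     reordered_result: list[T] = []
--     for i, value in enumerate(reversed(documents)):
--         if i % 2 == 1:
--             reordered_result.append(value)
--         else:
--             reordered_result.insert(0, value)
--     return reordered_result
-- ===== SOURCE B (Python) =====
-- def litm(documents):
--     """https://arxiv.org/abs//2307.03172"""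
--     front = []
--     back = []
--     odd = False
--     for value in reversed(documents):
--         (back if odd else front).append(value)
--         odd = not odd
--     front.reverse()
--     return front + back
-- ===== Notes on version B (the rewrite author's own statement) =====
-- stated objective: faster
-- what changed: Replaces the repeated list.insert(0, ...) on one growing list by a single pass into two accumulators (front/back) toggled by a boolean, reversing front once and concatenating at the end.
import Mathlib
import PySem

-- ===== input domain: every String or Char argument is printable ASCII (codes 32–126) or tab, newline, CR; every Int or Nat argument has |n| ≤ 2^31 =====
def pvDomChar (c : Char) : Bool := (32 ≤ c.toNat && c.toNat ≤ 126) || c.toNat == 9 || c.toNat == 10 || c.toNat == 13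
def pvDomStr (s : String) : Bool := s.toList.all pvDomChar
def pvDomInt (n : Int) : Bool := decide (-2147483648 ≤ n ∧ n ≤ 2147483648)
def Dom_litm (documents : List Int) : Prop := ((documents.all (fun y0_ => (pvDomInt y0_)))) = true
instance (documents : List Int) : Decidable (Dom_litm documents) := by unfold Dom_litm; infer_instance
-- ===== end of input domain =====

-- B replaces A's quadratic insert-at-front loop by one linear pass into two accumulators (front reversed once at the end); objective: faster.


-- ===== PORT A =====
-- loop body: if i % 2 == 1: reordered_result.append(value) else: reordered_result.insert(0, value)
def litmStep (acc : List Int) (p : Int × Int) : List Int :=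
  if PySem.Int.mod p.1 2 == 1 then acc ++ [p.2]
  else PySem.List.insert acc 0 p.2

-- for i, value in enumerate(reversed(documents)): litmStep
def litm (documents : List Int) : List Int :=
  (PySem.List.enumerate documents.reverse 0).foldl litmStep []

-- ===== PORT B =====
-- one pass over reversed(documents) into (front, back, odd); front reversed once at the end
def litmAltStep (s : List Int × List Int × Bool) (v : Int) : List Int × List Int × Bool :=
  if s.2.2 then (s.1, s.2.1 ++ [v], !s.2.2) else (s.1 ++ [v], s.2.1, !s.2.2)

def litm_alt (documents : List Int) : List Int :=
  let s := documents.reverse.foldl litmAltStep ([], [], false)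
  s.1.reverse ++ s.2.1

-- ===== PRECONDITION & SPEC =====
def Spec_litm (documents : List Int) (out : List Int) : Prop := out = litm_alt documents
instance (documents : List Int) (out : List Int) : Decidable (Spec_litm documents out) := by unfold Spec_litm; infer_instance

-- ===== CLAIM (what is proved, stated in full; the proofs are below) =====
def Claim_equal_litm : Prop := ∀ (documents : List Int), Dom_litm documents → Spec_litm documents (litm documents)

-- ===== LEMMAS AND PROOFS =====

theorem litm_mod_two (i : Nat) : PySem.Int.mod (i : Int) 2 = ((i % 2 : Nat) : Int) := by
  exact_mod_cast PySem.Int.mod_natCast i 2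

theorem litm_loop_eq (l : List Int) : ∀ (i : Nat) (f b : List Int),
    (PySem.List.enumerate l (i : Int)).foldl litmStep (f.reverse ++ b)
    = (let s := l.foldl litmAltStep (f, b, decide (i % 2 = 1)); s.1.reverse ++ s.2.1) := by
  induction l with
  | nil => intro i f b; simp [PySem.List.enumerate_nil]
  | cons x xs ih =>
    intro i f b
    rw [PySem.List.enumerate_cons]
    simp only [List.foldl_cons, litmAltStep]
    have hi : ((i : Int) + 1) = ((i + 1 : Nat) : Int) := by push_cast; ring
    by_cases h : i % 2 = 1
    · have hm : litmStep (f.reverse ++ b) ((i : Int), x) = f.reverse ++ (b ++ [x]) := by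
        rw [litmStep, litm_mod_two, h]; simp
      have hp : ¬ (i + 1) % 2 = 1 := by omega
      rw [hm, hi, ih (i + 1) f (b ++ [x])]
      simp [h, hp]
    · have hm : litmStep (f.reverse ++ b) ((i : Int), x) = (f ++ [x]).reverse ++ b := by
        have h2 : i % 2 = 0 := by omega
        rw [litmStep, litm_mod_two, h2]; simp [PySem.List.insert_zero]
      have hp : (i + 1) % 2 = 1 := by omega
      rw [hm, hi, ih (i + 1) (f ++ [x]) b]
      simp [h, hp]

-- ===== VERDICT (by name: the statement is the Claim_ definition above) =====
theorem litm_spec : Claim_equal_litm := by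
  intro documents _
  unfold Spec_litm litm litm_alt
  have := litm_loop_eq documents.reverse 0 [] []
  simpa using this
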